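-- pv_equiv track=rewrite | github.com/spolischook/codewars | python/test_your_order.py | order2
-- ===== SOURCE A (Python) =====
-- def order2(sentence):
--     words = {}
--     for word in sentence.split():
--         for i in range(0, len(word)):
--             try:
--                 n = int(word[i])
--                 words[word] = int(word[i])
--                 break
--             except ValueError:
--                 continue
--     return ' '.join(sorted(words, key=words.__getitem__))
-- ===== SOURCE B (Python) =====
-- def order2(sentence):
--     buckets = [[] for _ in range(10)]
--     seen = set()
--     for word in sentence.split():
--         if word in seen:
--             continue
--         for ch in word:
--             if '0' <= ch <= '9':
--                 buckets[ord(ch) - 48].append(word)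
--                 seen.add(word)
--                 break
--     return ' '.join(w for b in buckets for w in b)
-- ===== Notes on version B (the rewrite author's own statement) =====
-- stated objective: faster
-- what changed: B replaces A's comparison sort over the word->digit dict by a single-pass 10-bucket counting sort (a seen-set reproduces the dict's dedup), concatenating buckets 0..9 to get the same stable ascending-digit order.
import Mathlib
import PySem

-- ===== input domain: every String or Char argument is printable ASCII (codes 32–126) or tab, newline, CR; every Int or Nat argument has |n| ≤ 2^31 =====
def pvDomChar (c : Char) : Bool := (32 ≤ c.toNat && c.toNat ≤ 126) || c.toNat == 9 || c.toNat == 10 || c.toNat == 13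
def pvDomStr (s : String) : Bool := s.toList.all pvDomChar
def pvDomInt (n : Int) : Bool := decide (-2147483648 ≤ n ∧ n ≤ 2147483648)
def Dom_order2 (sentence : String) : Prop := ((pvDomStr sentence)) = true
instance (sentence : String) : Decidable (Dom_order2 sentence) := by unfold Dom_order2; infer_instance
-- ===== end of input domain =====

-- B replaces A's comparison sort (sorted with a digit key) by a 10-bucket counting sort
-- over the words, with a seen-set reproducing the dict's dedup; objective: alternative/faster mechanism.

-- ===== PORT A =====
-- inner loop 'for i in range(0, len(word)): try: n = int(word[i]) … break except ValueError: continue'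
-- — scans the characters of word in index order; int(word[i]) is PySem.Int.ofChars? [c]
def aScan (d : PySem.Dict String Int) (word : String) : List Char → PySem.Dict String Int
  | [] => d
  | c :: rest =>
    match PySem.Int.ofChars? [c] with
    | some n => d.insert word n
    | none => aScan d word rest

def order2 (sentence : String) : String :=
  let words := (PySem.Str.split₀ sentence).foldl
    (fun d word => aScan d word word.toList) PySem.Dict.empty
  PySem.Str.join " " (PySem.List.sorted words.keys (fun w => words.getD w 0))

-- ===== PORT B =====
-- inner loop 'for ch in word: if '0' <= ch <= '9': … break'
def bFirstDigit : List Char → Option Char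
  | [] => none
  | c :: rest => if '0' ≤ c ∧ c ≤ '9' then some c else bFirstDigit rest

def bStep (st : List (List String) × PySem.Set String) (word : String) :
    List (List String) × PySem.Set String :=
  if PySem.Set.contains st.2 word then st
  else
    match bFirstDigit word.toList with
    | some c =>
        (PySem.List.pySetD st.1 ((c.toNat : Int) - 48)
          (PySem.List.pyGetD st.1 ((c.toNat : Int) - 48) [] ++ [word]),
         PySem.Set.add st.2 word)
    | none => st

def order2_alt (sentence : String) : String :=
  let st := (PySem.Str.split₀ sentence).foldl bStep
    ([[], [], [], [], [], [], [], [], [], []], PySem.Set.empty)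
  PySem.Str.join " " st.1.flatten

-- ===== PRECONDITION & SPEC =====
def Spec_order2 (sentence : String) (out : String) : Prop := out = order2_alt sentence
instance (sentence : String) (out : String) : Decidable (Spec_order2 sentence out) := by unfold Spec_order2; infer_instance

-- ===== CLAIM (what is proved, stated in full; the proofs are below) =====
def Claim_equal_order2 : Prop := ∀ (sentence : String), Dom_order2 sentence → Spec_order2 sentence (order2 sentence)

-- ===== LEMMAS AND PROOFS =====

-- the key (first digit, as Python's int of it) and dict-membership test both ports agree on
def hasDig (w : String) : Bool := (bFirstDigit w.toList).isSome
def keyf (w : String) : Int :=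
  match bFirstDigit w.toList with
  | some c => (c.toNat : Int) - 48
  | none => -1
def ksTen : List Int := [0, 1, 2, 3, 4, 5, 6, 7, 8, 9]

-- int(c) for a single ASCII character: a value exactly when c is a decimal digit
theorem ofChars_single (c : Char) (hd : c.toNat ≤ 126) :
    PySem.Int.ofChars? [c] =
      if ('0' ≤ c ∧ c ≤ '9') then some ((c.toNat : Int) - 48) else none := by
  have hc : Char.ofNat c.toNat = c := Char.ofNat_toNat c
  rw [← hc]
  interval_cases h : c.toNat <;> decide

theorem bFirstDigit_some {cs : List Char} {c : Char} (h : bFirstDigit cs = some c) :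
    '0' ≤ c ∧ c ≤ '9' := by
  induction cs with
  | nil => simp [bFirstDigit] at h
  | cons a rest ih =>
    by_cases ha : ('0' ≤ a ∧ a ≤ '9')
    · simp [bFirstDigit, ha] at h; exact h ▸ ha
    · simp [bFirstDigit, ha] at h; exact ih h

theorem aScan_eq (d : PySem.Dict String Int) (word : String) (cs : List Char)
    (hd : ∀ c ∈ cs, c.toNat ≤ 126) :
    aScan d word cs =
      match bFirstDigit cs with
      | some c => d.insert word ((c.toNat : Int) - 48)
      | none => d := by
  induction cs with
  | nil => simp [aScan, bFirstDigit]
  | cons c rest ih =>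
    have hc := hd c (by simp)
    rw [show aScan d word (c :: rest) =
        (match PySem.Int.ofChars? [c] with
         | some n => d.insert word n
         | none => aScan d word rest) from rfl,
      ofChars_single c hc]
    by_cases h9 : ('0' ≤ c ∧ c ≤ '9')
    · simp [h9, bFirstDigit]
    · simp [h9, bFirstDigit]
      exact ih (fun a ha => hd a (by simp [ha]))

-- characterisation of A's dict: keys = ordered dedup of the digit-bearing words, value = first digit
theorem dictA_char (ws : List String)
    (hdom : ∀ w ∈ ws, ∀ c ∈ w.toList, c.toNat ≤ 126) :
    (ws.foldl (fun d w => aScan d w w.toList) PySem.Dict.empty).keys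
        = PySem.Set.ofList (ws.filter hasDig) ∧
      ∀ w ∈ PySem.Set.ofList (ws.filter hasDig),
        (ws.foldl (fun d w => aScan d w w.toList) PySem.Dict.empty).getD w 0 = keyf w := by
  induction ws using List.reverseRecOn with
  | nil => simp [PySem.Set.ofList]
  | append_singleton ws w ih =>
    obtain ⟨ihk, ihv⟩ := ih (fun v hv => hdom v (by simp [hv]))
    have hwch : ∀ c ∈ w.toList, c.toNat ≤ 126 := hdom w (by simp)
    simp only [List.foldl_append, List.foldl_cons, List.foldl_nil]
    rw [aScan_eq _ w w.toList hwch]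
    cases hbd : bFirstDigit w.toList with
    | none =>
      have hnd : hasDig w = false := by simp [hasDig, hbd]
      rw [List.filter_append]
      simp only [List.filter_cons, hnd, Bool.false_eq_true, if_false, List.filter_nil,
        List.append_nil]
      exact ⟨ihk, ihv⟩
    | some c =>
      have hd : hasDig w = true := by simp [hasDig, hbd]
      have hkeyw : keyf w = (c.toNat : Int) - 48 := by simp [keyf, hbd]
      have hS : PySem.Set.ofList ((ws ++ [w]).filter hasDig)
          = PySem.Set.add (PySem.Set.ofList (ws.filter hasDig)) w := by
        rw [List.filter_append, PySem.Set.ofList_eq_foldl, PySem.Set.ofList_eq_foldl,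
          List.foldl_append]
        simp [hd]
      rw [hS]
      by_cases hcont : (ws.foldl (fun d w => aScan d w w.toList) PySem.Dict.empty).contains w
      · have hmemS : w ∈ PySem.Set.ofList (ws.filter hasDig) := by
          rw [← ihk]; exact (PySem.Dict.contains_iff_mem_keys _ _).mp hcont
        have hadd : PySem.Set.add (PySem.Set.ofList (ws.filter hasDig)) w
            = PySem.Set.ofList (ws.filter hasDig) := by
          simp only [PySem.Set.add, (PySem.Set.contains_iff _ _).mpr hmemS, if_true]
        rw [hadd, PySem.Dict.keys_insert_of_contains _ _ hcont, ihk]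
        refine ⟨rfl, ?_⟩
        intro v hv
        rw [PySem.Dict.getD_insert]
        by_cases hvw : v = w
        · subst hvw; simp [hkeyw]
        · simp [hvw]; exact ihv v hv
      · have hnmemS : w ∉ PySem.Set.ofList (ws.filter hasDig) := by
          rw [← ihk]
          intro hmem
          exact hcont ((PySem.Dict.contains_iff_mem_keys _ _).mpr hmem)
        have hadd : PySem.Set.add (PySem.Set.ofList (ws.filter hasDig)) w
            = PySem.Set.ofList (ws.filter hasDig) ++ [w] := by
          simp only [PySem.Set.add]
          rw [if_neg]
          intro hc
          exact hnmemS ((PySem.Set.contains_iff _ _).mp hc)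
        rw [hadd, PySem.Dict.keys_insert_of_not_contains _ _ (by simpa using hcont), ihk]
        refine ⟨rfl, ?_⟩
        intro v hv
        rw [PySem.Dict.getD_insert]
        by_cases hvw : v = w
        · subst hvw; simp [hkeyw]
        · simp [hvw]
          rcases List.mem_append.mp hv with hv | hv
          · exact ihv v hv
          · simp at hv; exact absurd hv hvw

-- characterisation of B's state: seen = same dedup, bucket k = seen filtered to key k
theorem stB_char (ws : List String) :
    (ws.foldl bStep ([[], [], [], [], [], [], [], [], [], []], PySem.Set.empty)).2
        = PySem.Set.ofList (ws.filter hasDig) ∧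
      (ws.foldl bStep ([[], [], [], [], [], [], [], [], [], []], PySem.Set.empty)).1
        = ksTen.map (fun k =>
            (ws.filter hasDig |> PySem.Set.ofList).filter (fun w => decide (keyf w = k))) := by
  induction ws using List.reverseRecOn with
  | nil =>
    refine ⟨rfl, ?_⟩
    simp [ksTen, PySem.Set.ofList]
  | append_singleton ws w ih =>
    obtain ⟨ihS, ihB⟩ := ih
    simp only [List.foldl_append, List.foldl_cons, List.foldl_nil]
    set ST := ws.foldl bStep ([[], [], [], [], [], [], [], [], [], []], PySem.Set.empty) with hST
    by_cases hcont : PySem.Set.contains ST.2 w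
    · -- already seen: w has a digit and is already in the set; nothing changes
      have hmemS : w ∈ PySem.Set.ofList (ws.filter hasDig) := by
        rw [← ihS]; exact (PySem.Set.contains_iff _ _).mp hcont
      have hdw : hasDig w = true := by
        have := (PySem.Set.mem_ofList _ _).mp hmemS
        exact (List.mem_filter.mp this).2
      have hS : PySem.Set.ofList ((ws ++ [w]).filter hasDig)
          = PySem.Set.ofList (ws.filter hasDig) := by
        rw [List.filter_append, PySem.Set.ofList_eq_foldl, PySem.Set.ofList_eq_foldl,
          List.foldl_append]
        simp only [List.filter_cons, hdw, if_true, List.filter_nil, List.foldl_cons,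
          List.foldl_nil, PySem.Set.add, ← PySem.Set.ofList_eq_foldl]
        rw [if_pos ((PySem.Set.contains_iff _ _).mpr hmemS)]
      have hstep : bStep ST w = ST := by
        rw [bStep, if_pos hcont]
      rw [hstep, hS]
      exact ⟨ihS, ihB⟩
    · cases hbd : bFirstDigit w.toList with
      | none =>
        have hnd : hasDig w = false := by simp [hasDig, hbd]
        have hS : PySem.Set.ofList ((ws ++ [w]).filter hasDig)
            = PySem.Set.ofList (ws.filter hasDig) := by
          rw [List.filter_append]
          simp only [List.filter_cons, hnd, Bool.false_eq_true, if_false, List.filter_nil,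
            List.append_nil]
        have hstep : bStep ST w = ST := by
          rw [bStep, if_neg (by simpa using hcont)]
          simp only [hbd]
        rw [hstep, hS]
        exact ⟨ihS, ihB⟩
      | some c =>
        have hdw : hasDig w = true := by simp [hasDig, hbd]
        have hnmemS : w ∉ PySem.Set.ofList (ws.filter hasDig) := by
          rw [← ihS]
          intro hmem
          exact hcont ((PySem.Set.contains_iff _ _).mpr hmem)
        have hS : PySem.Set.ofList ((ws ++ [w]).filter hasDig)
            = PySem.Set.ofList (ws.filter hasDig) ++ [w] := by
          rw [List.filter_append, PySem.Set.ofList_eq_foldl, PySem.Set.ofList_eq_foldl,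
            List.foldl_append]
          simp only [List.filter_cons, hdw, if_true, List.filter_nil, List.foldl_cons,
            List.foldl_nil, PySem.Set.add, ← PySem.Set.ofList_eq_foldl]
          rw [if_neg (fun hc => hnmemS ((PySem.Set.contains_iff _ _).mp hc))]
        have hstep : bStep ST w =
            (PySem.List.pySetD ST.1 ((c.toNat : Int) - 48)
              (PySem.List.pyGetD ST.1 ((c.toNat : Int) - 48) [] ++ [w]),
             PySem.Set.add ST.2 w) := by
          rw [bStep, if_neg (by simpa using hcont)]
          simp only [hbd]
        have hsnd : PySem.Set.add ST.2 w = PySem.Set.ofList (ws.filter hasDig) ++ [w] := by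
          rw [ihS, PySem.Set.add,
            if_neg (fun hc => hnmemS ((PySem.Set.contains_iff _ _).mp hc))]
        have hkeyw : keyf w = (c.toNat : Int) - 48 := by simp [keyf, hbd]
        obtain ⟨h1, h2⟩ := bFirstDigit_some hbd
        have h48 : 48 ≤ c.toNat := UInt32.le_iff_toNat_le.mp (Char.le_def.mp h1)
        have h57 : c.toNat ≤ 57 := UInt32.le_iff_toNat_le.mp (Char.le_def.mp h2)
        rw [hstep, hS]
        refine ⟨by rw [hsnd], ?_⟩
        rw [ihB]
        generalize hn : c.toNat = n at hkeyw h48 h57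
        interval_cases n <;>
          · norm_num at hkeyw ⊢
            simp [ksTen, PySem.List.pySetD, PySem.List.pySet?, PySem.List.pyGetD,
              PySem.List.pyGet?, PySem.List.pyIdx?, List.getD, List.filter_append, hkeyw]

-- insertion skips a prefix it is not ordered before
theorem insertBy_append {α : Type} (before : α → α → Bool) (x : α) (ys zs : List α)
    (h : ∀ y ∈ ys, before x y = false) :
    PySem.List.insertBy before x (ys ++ zs) = ys ++ PySem.List.insertBy before x zs := by
  induction ys with
  | nil => simp
  | cons y ys ih =>
    have hy := h y (by simp)
    have ih' := ih (fun a ha => h a (by simp [ha]))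
    simpa [PySem.List.insertBy, hy] using ih'

-- inserting x into a bucket concatenation appends it to its own bucket
theorem insertBy_buckets {α : Type} (key : α → Int) (x : α) (M : List α) (ks : List Int)
    (hmono : ks.Pairwise (· < ·)) (hx : key x ∈ ks) :
    PySem.List.insertBy (fun a b => decide (key a < key b)) x
        ((ks.map (fun k => M.filter (fun w => decide (key w = k)))).flatten)
      = (ks.map (fun k => (M ++ [x]).filter (fun w => decide (key w = k)))).flatten := by
  induction ks with
  | nil => simp at hx
  | cons k ks ih =>
    have hlt : ∀ k' ∈ ks, k < k' := (List.pairwise_cons.mp hmono).1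
    have hmem_rest : ∀ r ∈ (ks.map (fun k => M.filter (fun w => decide (key w = k)))).flatten,
        key r ∈ ks := by
      intro r hr
      rcases List.mem_flatten.mp hr with ⟨l, hl, hrl⟩
      rcases List.mem_map.mp hl with ⟨k', hk', rfl⟩
      have := (List.mem_filter.mp hrl).2
      simp at this
      exact this ▸ hk'
    rcases List.mem_cons.mp hx with hk | hk
    · have hpre : ∀ y ∈ M.filter (fun w => decide (key w = k)),
          (fun a b => decide (key a < key b)) x y = false := by
        intro y hy
        have := (List.mem_filter.mp hy).2
        simp at this
        simp [this, hk]
      rw [List.map_cons, List.flatten_cons, insertBy_append _ _ _ _ hpre]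
      have hpost : PySem.List.insertBy (fun a b => decide (key a < key b)) x
          ((ks.map (fun k => M.filter (fun w => decide (key w = k)))).flatten)
          = x :: (ks.map (fun k => M.filter (fun w => decide (key w = k)))).flatten := by
        cases hrest : (ks.map (fun k => M.filter (fun w => decide (key w = k)))).flatten with
        | nil => simp [PySem.List.insertBy]
        | cons r rs =>
          have hr : key r ∈ ks := hmem_rest r (by simp [hrest])
          have : key x < key r := hk ▸ hlt _ hr
          simp [PySem.List.insertBy, this]
      rw [hpost]
      have htail : ks.map (fun k => (M ++ [x]).filter (fun w => decide (key w = k)))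
          = ks.map (fun k => M.filter (fun w => decide (key w = k))) := by
        refine List.map_congr_left ?_
        intro k' hk'
        have hne : key x ≠ k' := by have := hlt k' hk'; omega
        simp [List.filter_append, hne]
      have hhead : (M ++ [x]).filter (fun w => decide (key w = k))
          = M.filter (fun w => decide (key w = k)) ++ [x] := by
        simp [List.filter_append, hk]
      rw [List.map_cons, List.flatten_cons, htail, hhead]
      simp
    · have hkx : k < key x := hlt _ hk
      have hpre : ∀ y ∈ M.filter (fun w => decide (key w = k)),
          (fun a b => decide (key a < key b)) x y = false := by
        intro y hy
        have := (List.mem_filter.mp hy).2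
        simp at this
        simp [this]
        omega
      rw [List.map_cons, List.flatten_cons, insertBy_append _ _ _ _ hpre]
      have hhead : (M ++ [x]).filter (fun w => decide (key w = k))
          = M.filter (fun w => decide (key w = k)) := by
        have hne : key x ≠ k := by omega
        simp [List.filter_append, hne]
      rw [List.map_cons, List.flatten_cons, hhead,
        ih (List.pairwise_cons.mp hmono).2 hk]

-- the stable sort by a key ranging over ks equals the bucket concatenation
theorem sorted_eq_buckets {α : Type} (key : α → Int) (L : List α) (ks : List Int)
    (hmono : ks.Pairwise (· < ·)) (hL : ∀ w ∈ L, key w ∈ ks) :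
    PySem.List.sorted L key
      = (ks.map (fun k => L.filter (fun w => decide (key w = k)))).flatten := by
  induction L using List.reverseRecOn with
  | nil =>
    rw [PySem.List.sorted_eq_foldl_insertBy]
    simp
  | append_singleton M x ih =>
    rw [PySem.List.sorted_eq_foldl_insertBy, List.foldl_append, List.foldl_cons, List.foldl_nil,
      ← PySem.List.sorted_eq_foldl_insertBy,
      ih (fun w hw => hL w (by simp [hw]))]
    exact insertBy_buckets key x M ks hmono (hL x (by simp))

-- chars of the words produced by split() are chars of the sentence
theorem split₀_go_chars (P : Char → Prop) (cs cur : List Char) (acc : List (List Char))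
    (hcs : ∀ c ∈ cs, P c) (hcur : ∀ c ∈ cur, P c) (hacc : ∀ w ∈ acc, ∀ c ∈ w, P c) :
    ∀ w ∈ PySem.Chars.split₀.go cs cur acc, ∀ c ∈ w, P c := by
  induction cs generalizing cur acc with
  | nil =>
    intro w hw
    by_cases hc : cur.isEmpty
    · simp [PySem.Chars.split₀.go, hc] at hw
      exact hacc w (by simpa using hw)
    · simp [PySem.Chars.split₀.go, hc] at hw
      rcases hw with hw | hw
      · exact hacc w (by simpa using hw)
      · subst hw; intro c hc'; exact hcur c (by simpa using hc')
  | cons a rest ih =>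
    have ha := hcs a (by simp)
    have hrest : ∀ c ∈ rest, P c := fun c hc => hcs c (by simp [hc])
    by_cases hsp : PySem.Chars.isspace a
    · by_cases hc : cur.isEmpty
      · intro w hw
        simp only [PySem.Chars.split₀.go, hsp, hc, if_true] at hw
        exact ih [] acc hrest (by simp) hacc w hw
      · intro w hw
        simp only [PySem.Chars.split₀.go, hsp, hc, if_true] at hw
        refine ih [] (cur.reverse :: acc) hrest (by simp) ?_ w hw
        intro v hv
        rcases List.mem_cons.mp hv with hv | hv
        · subst hv; intro c hcc; exact hcur c (by simpa using hcc)
        · exact hacc v hv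
    · intro w hw
      simp only [PySem.Chars.split₀.go, hsp] at hw
      refine ih (a :: cur) acc hrest ?_ hacc w hw
      intro c hcc
      rcases List.mem_cons.mp hcc with hcc | hcc
      · subst hcc; exact ha
      · exact hcur c hcc

theorem split₀_chars (s : String) (hs : Dom_order2 s) :
    ∀ w ∈ PySem.Str.split₀ s, ∀ c ∈ w.toList, c.toNat ≤ 126 := by
  intro w hw
  rw [PySem.Str.split₀.eq_1] at hw
  rcases List.mem_map.mp hw with ⟨cs, hcs, rfl⟩
  have hdom : ∀ c ∈ s.toList, c.toNat ≤ 126 := by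
    intro c hc
    have := List.all_eq_true.mp hs c hc
    simp [pvDomChar] at this
    omega
  have := split₀_go_chars (fun c => c.toNat ≤ 126) s.toList [] [] hdom
    (by simp) (by simp) cs (by simpa [PySem.Chars.split₀] using hcs)
  simpa using this

-- ===== VERDICT (by name: the statement is the Claim_ definition above) =====
theorem order2_spec : Claim_equal_order2 := by
  intro s hs
  have hdom := split₀_chars s hs
  obtain ⟨hak, hav⟩ := dictA_char (PySem.Str.split₀ s) hdom
  obtain ⟨hbS, hbB⟩ := stB_char (PySem.Str.split₀ s)
  show PySem.Str.join " " (PySem.List.sorted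
      ((PySem.Str.split₀ s).foldl (fun d word => aScan d word word.toList)
        PySem.Dict.empty).keys
      (fun w => ((PySem.Str.split₀ s).foldl (fun d word => aScan d word word.toList)
        PySem.Dict.empty).getD w 0))
    = PySem.Str.join " "
      ((PySem.Str.split₀ s).foldl bStep
        ([[], [], [], [], [], [], [], [], [], []], PySem.Set.empty)).1.flatten
  rw [hak, hbB]
  have hmono : ksTen.Pairwise (· < ·) := by decide
  have hL : ∀ w ∈ PySem.Set.ofList ((PySem.Str.split₀ s).filter hasDig),
      ((PySem.Str.split₀ s).foldl (fun d word => aScan d word word.toList)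
        PySem.Dict.empty).getD w 0 ∈ ksTen := by
    intro w hw
    rw [hav w hw]
    have hdig : hasDig w = true := by
      have := (PySem.Set.mem_ofList _ _).mp hw
      exact (List.mem_filter.mp this).2
    rcases hsome : bFirstDigit w.toList with _ | c
    · simp [hasDig, hsome] at hdig
    · have h1 : 48 ≤ c.toNat := UInt32.le_iff_toNat_le.mp
        (Char.le_def.mp (bFirstDigit_some hsome).1)
      have h2 : c.toNat ≤ 57 := UInt32.le_iff_toNat_le.mp
        (Char.le_def.mp (bFirstDigit_some hsome).2)
      have : keyf w = (c.toNat : Int) - 48 := by simp [keyf, hsome]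
      rw [this]
      simp [ksTen]
      omega
  rw [sorted_eq_buckets _ _ ksTen hmono hL]
  have hfilters : ksTen.map (fun k =>
        (PySem.Set.ofList ((PySem.Str.split₀ s).filter hasDig)).filter
          (fun w => decide (((PySem.Str.split₀ s).foldl
            (fun d word => aScan d word word.toList) PySem.Dict.empty).getD w 0 = k)))
      = ksTen.map (fun k =>
        (PySem.Set.ofList ((PySem.Str.split₀ s).filter hasDig)).filter
          (fun w => decide (keyf w = k))) := by
    refine List.map_congr_left ?_
    intro k hk
    refine List.filter_congr ?_
    intro w hw
    rw [hav w hw]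
  rw [hfilters]
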